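-- pv_equiv track=rewrite | github.com/Cloud-Code-AI/kaizen | kaizen/generator/api_test.py | _correct_imports
-- ===== SOURCE A (Python) =====
-- def _correct_imports(test_code):
--     # Split the test_code into lines
--     lines = test_code.split("\n")
--     corrected_lines = []
--     for line in lines:
--         if line.startswith("from /"):
--             # Remove the leading slash and change to relative import
--             corrected_line = "from " + line[6:]
--             corrected_lines.append(corrected_line)
--         else:
--             corrected_lines.append(line)
--     return "\n".join(corrected_lines)
-- ===== SOURCE B (Python) =====
-- def _correct_imports(test_code):
--     # Single left-to-right scan (state machine): at each line start, rewrite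
--     # a "from /" prefix to "from "; never builds a list of lines.
--     out = []
--     i = 0
--     line_start = True
--     n = len(test_code)
--     while i < n:
--         if line_start and test_code.startswith("from /", i):
--             out.append("from ")
--             i += 6
--             line_start = False
--         else:
--             c = test_code[i]
--             out.append(c)
--             line_start = c == "\n"
--             i += 1
--     return "".join(out)
-- ===== Notes on version B (the rewrite author's own statement) =====
-- stated objective: alternative
-- what changed: Replaced split-into-lines / per-line branch / join with a single left-to-right character scan that tracks line starts in a boolean and rewrites 'from /' to 'from ' in place.
import Mathlib
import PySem

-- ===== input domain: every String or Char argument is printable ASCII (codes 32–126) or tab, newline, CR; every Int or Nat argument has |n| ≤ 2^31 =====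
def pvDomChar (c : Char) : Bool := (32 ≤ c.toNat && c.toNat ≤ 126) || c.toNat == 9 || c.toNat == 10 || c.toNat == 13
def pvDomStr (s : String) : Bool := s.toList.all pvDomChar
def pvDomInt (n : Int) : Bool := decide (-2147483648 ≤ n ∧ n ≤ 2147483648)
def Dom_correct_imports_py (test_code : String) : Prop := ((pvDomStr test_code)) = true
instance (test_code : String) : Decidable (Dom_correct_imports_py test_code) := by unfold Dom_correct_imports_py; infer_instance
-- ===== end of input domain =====

-- B replaces A's split/per-line-loop/join with a single character scan tracking line starts (alternative decomposition, same result).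

-- ===== PORT A =====
-- A: split on "\n", fix each line that starts with "from /" ("from " + line[6:]), re-join.
def correct_imports_py (test_code : String) : String :=
  let lines := PySem.Chars.splitOn test_code.toList "\n".toList
  let corrected_lines := lines.foldl
    (fun acc line =>
      if PySem.Chars.startswith line "from /".toList then
        acc ++ ["from ".toList ++ PySem.Chars.slice line (some 6) none]
      else
        acc ++ [line])
    ([] : List (List Char))
  String.ofList (PySem.Chars.join "\n".toList corrected_lines)

-- ===== PORT B =====
-- B: one pass; at a line start a "from /" prefix is rewritten to "from ", else copy the char.
def scanFix : List Char → Bool → List Char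
  | [], _ => []
  | c :: rest, atStart =>
      if atStart && PySem.Chars.startswith (c :: rest) "from /".toList then
        "from ".toList ++ scanFix (rest.drop 5) false
      else
        c :: scanFix rest (c == '\n')
  termination_by cs _ => cs.length
  decreasing_by
    all_goals simp [List.length_drop, List.length_cons]

def correct_imports_py_alt (test_code : String) : String :=
  String.ofList (scanFix test_code.toList true)

-- ===== PRECONDITION & SPEC =====
def Spec_correct_imports_py (test_code : String) (out : String) : Prop := out = correct_imports_py_alt test_code
instance (test_code : String) (out : String) : Decidable (Spec_correct_imports_py test_code out) := by unfold Spec_correct_imports_py; infer_instance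

-- ===== CLAIM (what is proved, stated in full; the proofs are below) =====
def Claim_equal_correct_imports_py : Prop := ∀ (test_code : String), Dom_correct_imports_py test_code → Spec_correct_imports_py test_code (correct_imports_py test_code)

-- ===== LEMMAS AND PROOFS =====

-- A's per-line fix, with line[6:] written as List.drop 6.
def fixL (line : List Char) : List Char :=
  if PySem.Chars.startswith line "from /".toList then "from ".toList ++ line.drop 6 else line

-- reference model of Python str.split("\n"): pre is the part of the current piece read so far
def mySplit : List Char → List Char → List (List Char)
  | pre, [] => [pre]
  | pre, c :: rest => if c = '\n' then pre :: mySplit [] rest else mySplit (pre ++ [c]) rest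

lemma mySplit_ne_nil (pre l : List Char) : mySplit pre l ≠ [] := by
  induction l generalizing pre with
  | nil => simp [mySplit]
  | cons c rest ih => simp only [mySplit]; split <;> simp [ih]

lemma go_eq (fuel : Nat) (l cur : List Char) (acc : List (List Char)) (h : l.length < fuel) :
    PySem.Chars.splitOn.go ['\n'] fuel l cur acc = acc.reverse ++ mySplit cur.reverse l := by
  induction fuel generalizing l cur acc with
  | zero => omega
  | succ fuel ih =>
    cases l with
    | nil => simp [PySem.Chars.splitOn.go, mySplit]
    | cons c rest =>
      simp only [PySem.Chars.splitOn.go]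
      by_cases hc : c = '\n'
      · subst hc
        rw [if_pos (by simp [List.isPrefixOf])]
        rw [ih _ _ _ (by simpa using Nat.lt_of_succ_lt_succ h)]
        simp [mySplit]
      · rw [if_neg (by simp [List.isPrefixOf]; exact fun e => hc e.symm)]
        rw [ih _ _ _ (Nat.lt_of_succ_lt_succ h)]
        simp [mySplit, hc]

lemma splitOn_eq (cs : List Char) : PySem.Chars.splitOn cs ['\n'] = mySplit [] cs := by
  show PySem.Chars.splitOn.go ['\n'] (cs.length + 1) cs [] [] = mySplit [] cs
  rw [go_eq _ _ _ _ (Nat.lt_succ_self _)]; rfl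

-- the common line-recursive normal form
def lineRec (cs : List Char) : List Char :=
  if h : cs.dropWhile (· ≠ '\n') = [] then fixL cs
  else fixL (cs.takeWhile (· ≠ '\n')) ++ '\n' :: lineRec ((cs.dropWhile (· ≠ '\n')).tail)
  termination_by cs.length
  decreasing_by
    have h1 := (List.dropWhile_sublist (l := cs) (p := (· ≠ '\n'))).length_le
    cases hd : cs.dropWhile (· ≠ '\n') with
    | nil => exact absurd hd h
    | cons x xs => rw [hd] at h1; simp [hd]; simp at h1; omega

lemma takeWhile_eq_of_dropWhile_nil {p : Char → Bool} {cs : List Char}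
    (h : cs.dropWhile p = []) : cs.takeWhile p = cs := by
  have := List.takeWhile_append_dropWhile (p := p) (l := cs)
  rw [h, List.append_nil] at this; exact this

lemma lineRec_eq (cs : List Char) :
    lineRec cs = fixL (cs.takeWhile (· ≠ '\n')) ++
      (if cs.dropWhile (· ≠ '\n') = [] then []
       else '\n' :: lineRec ((cs.dropWhile (· ≠ '\n')).tail)) := by
  rw [lineRec]
  by_cases h : cs.dropWhile (· ≠ '\n') = []
  · rw [dif_pos h, if_pos h, takeWhile_eq_of_dropWhile_nil h, List.append_nil]
  · rw [dif_neg h, if_neg h]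

lemma joinA_eq (cs : List Char) : ∀ pre,
    PySem.Chars.join ['\n'] ((mySplit pre cs).map fixL) =
      fixL (pre ++ cs.takeWhile (· ≠ '\n')) ++
        (if cs.dropWhile (· ≠ '\n') = [] then []
         else '\n' :: lineRec ((cs.dropWhile (· ≠ '\n')).tail)) := by
  induction cs with
  | nil => intro pre; simp [mySplit, PySem.Chars.join_singleton]
  | cons c rest ih =>
    intro pre
    by_cases hc : c = '\n'
    · subst hc
      have hms : mySplit pre ('\n' :: rest) = pre :: mySplit [] rest := by simp [mySplit]
      rw [hms, List.map_cons]
      obtain ⟨d, ds, hd⟩ := List.exists_cons_of_ne_nil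
        (show (mySplit [] rest).map fixL ≠ [] by simp [mySplit_ne_nil])
      rw [hd, PySem.Chars.join_cons_cons, ← hd, ih [], List.nil_append, ← lineRec_eq]
      simp [List.takeWhile_cons, List.dropWhile_cons]
    · simp only [mySplit, if_neg hc]
      rw [ih (pre ++ [c])]
      have hcb : ((c ≠ '\n') : Bool) = true := by simp [hc]
      simp [List.takeWhile_cons, List.dropWhile_cons, hc, List.append_assoc]

lemma scan_false (cs : List Char) :
    scanFix cs false =
      cs.takeWhile (· ≠ '\n') ++
        (if cs.dropWhile (· ≠ '\n') = [] then []
         else '\n' :: scanFix ((cs.dropWhile (· ≠ '\n')).tail) true) := by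
  induction cs with
  | nil => simp [scanFix]
  | cons c rest ih =>
    rw [scanFix]
    simp only [Bool.false_and]
    rw [if_neg (by simp)]
    by_cases hc : c = '\n'
    · subst hc
      simp [List.takeWhile_cons, List.dropWhile_cons]
    · have : (c == '\n') = false := by simp [hc]
      rw [this, ih]
      simp [List.takeWhile_cons, List.dropWhile_cons, hc]

lemma startswith_append (p t : List Char) : PySem.Chars.startswith (p ++ t) p = true := by
  rw [PySem.Chars.startswith_iff]; exact List.prefix_append p t

lemma scan_true_aux (n : Nat) : ∀ cs : List Char, cs.length ≤ n → scanFix cs true = lineRec cs := by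
  induction n with
  | zero =>
    intro cs hcs
    have : cs = [] := List.eq_nil_of_length_eq_zero (Nat.le_zero.mp hcs)
    subst this
    rw [lineRec]; simp [scanFix, fixL, PySem.Chars.startswith]
  | succ n ih =>
    intro cs hcs
    by_cases h : PySem.Chars.startswith cs "from /".toList = true
    · obtain ⟨t, ht⟩ := (PySem.Chars.startswith_iff _ _).mp h
      subst ht
      have hlt : t.length ≤ n := by simp at hcs; omega
      have htail : ∀ x xs, t.dropWhile (· ≠ '\n') = x :: xs → xs.length ≤ n := by
        intro x xs hx
        have h1 := (List.dropWhile_sublist (l := t) (p := (· ≠ '\n'))).length_le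
        rw [hx] at h1; simp at h1; omega
      have hlit : ("from /".toList ++ t) = 'f' :: 'r' :: 'o' :: 'm' :: ' ' :: '/' :: t := rfl
      rw [hlit, scanFix]
      rw [if_pos (by
        simp only [Bool.true_and]
        exact hlit ▸ startswith_append "from /".toList t)]
      have hdrop : (List.drop 5 ('r' :: 'o' :: 'm' :: ' ' :: '/' :: t)) = t := by simp
      rw [hdrop, scan_false, ← hlit, lineRec_eq]
      have htake : ("from /".toList ++ t).takeWhile (· ≠ '\n') = "from /".toList ++ t.takeWhile (· ≠ '\n') := by
        simp [List.takeWhile_cons]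
      have hdw : ("from /".toList ++ t).dropWhile (· ≠ '\n') = t.dropWhile (· ≠ '\n') := by
        simp [List.dropWhile_cons]
      rw [htake, hdw]
      rw [fixL, if_pos (startswith_append _ _)]
      have hd6 : ("from /".toList ++ t.takeWhile (· ≠ '\n')).drop 6 = t.takeWhile (· ≠ '\n') := by simp
      rw [hd6]
      cases hx : t.dropWhile (· ≠ '\n') with
      | nil => simp
      | cons x xs =>
        simp only [List.tail_cons]
        rw [ih xs (htail x xs hx)]
        simp [List.append_assoc]
    · cases cs with
      | nil => rw [lineRec]; simp [scanFix, fixL, PySem.Chars.startswith]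
      | cons c rest =>
        have hlen : rest.length ≤ n := by simp at hcs; omega
        have htail : ∀ x xs, rest.dropWhile (· ≠ '\n') = x :: xs → xs.length ≤ n := by
          intro x xs hx
          have h1 := (List.dropWhile_sublist (l := rest) (p := (· ≠ '\n'))).length_le
          rw [hx] at h1; simp at h1; omega
        have hfalse : PySem.Chars.startswith (c :: rest) "from /".toList = false := by
          revert h; cases PySem.Chars.startswith (c :: rest) "from /".toList <;> simp
        rw [scanFix]
        simp only [Bool.true_and, hfalse]
        rw [if_neg (by simp)]
        by_cases hc : c = '\n'
        · subst hc
          rw [lineRec_eq]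
          simp only [List.takeWhile_cons, List.dropWhile_cons]
          simp [fixL, PySem.Chars.startswith, ih rest hlen]
        · have hcb : (c == '\n') = false := by simp [hc]
          rw [hcb, scan_false, lineRec_eq]
          simp only [List.takeWhile_cons, List.dropWhile_cons]
          have hcb2 : (decide (c ≠ '\n')) = true := by simp [hc]
          rw [hcb2]
          simp only [if_true]
          have hfix : fixL (c :: rest.takeWhile (· ≠ '\n')) = c :: rest.takeWhile (· ≠ '\n') := by
            rw [fixL, if_neg]
            intro hp
            apply h
            rw [PySem.Chars.startswith_iff]
            exact ((PySem.Chars.startswith_iff _ _).mp hp).trans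
              (List.cons_prefix_cons.mpr ⟨rfl, List.takeWhile_prefix _⟩)
          rw [hfix]
          simp only [List.cons_append]
          cases hx : rest.dropWhile (· ≠ '\n') with
          | nil => simp
          | cons x xs =>
            simp only [List.tail_cons]
            rw [ih xs (htail x xs hx)]

lemma fixL_body (line : List Char) :
    (if PySem.Chars.startswith line "from /".toList then
        "from ".toList ++ PySem.Chars.slice line (some 6) none
      else line) = fixL line := by
  rw [fixL]
  by_cases h : PySem.Chars.startswith line "from /".toList = true
  · rw [if_pos h, if_pos h, PySem.Chars.slice_eq_listSlice, PySem.List.slice_from _ (by norm_num)]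
    simp
  · rw [if_neg h, if_neg h]

-- ===== VERDICT (by name: the statement is the Claim_ definition above) =====
theorem correct_imports_py_spec : Claim_equal_correct_imports_py := by
  intro s _
  unfold Spec_correct_imports_py correct_imports_py correct_imports_py_alt
  have hnl : ("\n".toList) = ['\n'] := rfl
  simp only [hnl]
  rw [splitOn_eq]
  have hfold : ∀ ls : List (List Char),
      ls.foldl (fun acc line =>
        if PySem.Chars.startswith line "from /".toList then
          acc ++ ["from ".toList ++ PySem.Chars.slice line (some 6) none]
        else acc ++ [line]) [] = ls.map fixL := by
    intro ls
    have hb : (fun (acc : List (List Char)) line =>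
        if PySem.Chars.startswith line "from /".toList then
          acc ++ ["from ".toList ++ PySem.Chars.slice line (some 6) none]
        else acc ++ [line]) = fun acc line => acc ++ [fixL line] := by
      funext acc line
      rw [← fixL_body]
      split <;> rfl
    rw [hb, PySem.List.foldl_append_singleton_eq_map, List.nil_append]
  rw [hfold, joinA_eq _ [], List.nil_append, ← lineRec_eq, ← scan_true_aux s.toList.length s.toList le_rfl]
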